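-- pv_equiv track=rewrite | github.com/karas84/ProjectZeroUndub | zeroundub/zero/tim2.py | defilter_palette
-- ===== SOURCE A (Python) =====
-- def defilter_palette(palette):
--     length = len(palette)
--
--     parts = length // 32
--     stripes = 2
--     colors = 8
--     blocks = 2
--
--     new_colors = [0] * length
--
--     refilter_map: list[int] = []
--
--     i = 0
--     for part in range(parts):
--         for block in range(blocks):
--             for stripe in range(stripes):
--                 for color in range(colors):
--                     j = (part * colors * stripes * blocks) + (block * colors) + (stripe * stripes * colors) + color
--                     new_colors[i] = palette[j]
--                     refilter_map.append(j)
--                     i += 1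
--
--     return new_colors, refilter_map
-- ===== SOURCE B (Python) =====
-- def defilter_palette(palette):
--     length = len(palette)
--     n = (length // 32) * 32
--     refilter_map = [(i // 32) * 32 + (i % 32 // 16) * 8 + (i % 16 // 8) * 16 + i % 8
--                     for i in range(n)]
--     new_colors = [palette[j] for j in refilter_map] + [0] * (length - n)
--     return new_colors, refilter_map
-- ===== Notes on version B (the rewrite author's own statement) =====
-- stated objective: simpler
-- what changed: Replaces the four nested counter loops with a single flat loop computing the source index in closed form from i via div/mod, then gathers new_colors in one comprehension.
import Mathlib
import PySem

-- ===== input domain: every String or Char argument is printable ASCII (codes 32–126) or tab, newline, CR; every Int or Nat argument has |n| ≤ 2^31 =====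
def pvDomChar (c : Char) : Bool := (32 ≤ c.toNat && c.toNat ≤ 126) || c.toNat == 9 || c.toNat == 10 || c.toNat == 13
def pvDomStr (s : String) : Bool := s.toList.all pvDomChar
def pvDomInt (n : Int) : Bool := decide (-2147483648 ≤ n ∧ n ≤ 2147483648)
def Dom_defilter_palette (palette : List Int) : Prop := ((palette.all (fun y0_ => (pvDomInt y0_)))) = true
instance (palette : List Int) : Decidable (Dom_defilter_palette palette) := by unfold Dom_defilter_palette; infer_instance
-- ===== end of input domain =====

-- B replaces the four nested counter loops by one flat loop with a closed-form source index (simpler decomposition, same O(n) cost).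

-- ===== PORT A =====
-- A indexes palette[j] with 0 ≤ j < len(palette) always, so List.getD is exact here.
def defilter_palette (palette : List Int) : List Int × List Int :=
  let length := palette.length
  let parts := length / 32
  let st := (List.range parts).foldl (fun st part =>
    (List.range 2).foldl (fun st block =>
      (List.range 2).foldl (fun st stripe =>
        (List.range 8).foldl (fun st color =>
          let j : Nat := part * 8 * 2 * 2 + block * 8 + stripe * 2 * 8 + color
          (st.1.set st.2.2 (palette.getD j 0), st.2.1 ++ [(j : Int)], st.2.2 + 1)) st) st) st)
    (List.replicate length 0, ([] : List Int), 0)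
  (st.1, st.2.1)

-- ===== PORT B =====
def source_index (i : Nat) : Nat := i / 32 * 32 + i % 32 / 16 * 8 + i % 16 / 8 * 16 + i % 8

def defilter_palette_alt (palette : List Int) : List Int × List Int :=
  let length := palette.length
  let n := length / 32 * 32
  let refilter_map := (List.range n).map (fun i => ((source_index i : Nat) : Int))
  let new_colors := refilter_map.map (fun j => palette.getD j.toNat 0) ++ List.replicate (length - n) 0
  (new_colors, refilter_map)

-- ===== PRECONDITION & SPEC =====
def Spec_defilter_palette (palette : List Int) (out : List Int × List Int) : Prop := out = defilter_palette_alt palette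
instance (palette : List Int) (out : List Int × List Int) : Decidable (Spec_defilter_palette palette out) := by unfold Spec_defilter_palette; infer_instance

-- ===== CLAIM (what is proved, stated in full; the proofs are below) =====
def Claim_equal_defilter_palette : Prop := ∀ (palette : List Int), Dom_defilter_palette palette → Spec_defilter_palette palette (defilter_palette palette)

-- ===== LEMMAS AND PROOFS =====

/-- The common loop body: set position `i` of the colour buffer, record `j`, bump `i`. -/
def pvBody (pal : List Int) (st : List Int × List Int × Nat) (j : Nat) : List Int × List Int × Nat :=
  (st.1.set st.2.2 (pal.getD j 0), st.2.1 ++ [(j : Int)], st.2.2 + 1)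

/-- One `part`-iteration of A is a fold of `pvBody` over the 32 source indices of that part. -/
lemma stepA_eq (pal : List Int) (st : List Int × List Int × Nat) (p : Nat) :
    (List.range 2).foldl (fun st block =>
      (List.range 2).foldl (fun st stripe =>
        (List.range 8).foldl (fun st color =>
          (st.1.set st.2.2 (pal.getD (p * 8 * 2 * 2 + block * 8 + stripe * 2 * 8 + color) 0),
           st.2.1 ++ [((p * 8 * 2 * 2 + block * 8 + stripe * 2 * 8 + color : Nat) : Int)],
           st.2.2 + 1)) st) st) st
    = List.foldl (pvBody pal) st ((List.range 32).map (fun k => source_index (32 * p + k))) := by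
  have h : (List.range 32).map (fun k => source_index (32 * p + k))
      = (List.range 32).map (fun k => p * 8 * 2 * 2 + k / 16 * 8 + k % 16 / 8 * 2 * 8 + k % 8) := by
    refine List.map_congr_left (fun k hk => ?_)
    have hk32 : k < 32 := List.mem_range.mp hk
    simp only [source_index]; omega
  rw [h]
  rfl

/-- A's outer fold flattened to a single fold of `pvBody` over all source indices. -/
lemma outerA (pal : List Int) (init : List Int × List Int × Nat) (P : Nat) :
    (List.range P).foldl (fun st part =>
        List.foldl (pvBody pal) st ((List.range 32).map (fun k => source_index (32 * part + k)))) init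
    = List.foldl (pvBody pal) init ((List.range (32 * P)).map source_index) := by
  induction P with
  | zero => simp
  | succ P ih =>
      rw [show List.range (P + 1) = List.range P ++ [P] from List.range_succ, List.foldl_append, ih]
      have h32 : 32 * (P + 1) = 32 * P + 32 := by ring
      rw [h32, List.range_add, List.map_append, List.foldl_append, List.map_map]
      simp [Function.comp_def]

/-- The flat fold from the initial state, characterised in closed form. -/
lemma foldl_body_range (pal : List Int) (m : Nat) (hm : m ≤ pal.length) :
    List.foldl (pvBody pal) (List.replicate pal.length 0, ([] : List Int), 0)
        ((List.range m).map source_index)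
    = ((List.range m).map (fun i => pal.getD (source_index i) 0)
         ++ List.replicate (pal.length - m) 0,
       (List.range m).map (fun i => ((source_index i : Nat) : Int)),
       m) := by
  induction m with
  | zero => simp
  | succ m ih =>
      have hm' : m ≤ pal.length := Nat.le_of_succ_le hm
      rw [List.range_succ, List.map_append, List.foldl_append, ih hm']
      simp only [List.map_cons, List.map_nil, List.foldl_cons, List.foldl_nil, pvBody]
      refine Prod.ext ?_ (Prod.ext ?_ rfl)
      · show ((List.range m).map (fun i => pal.getD (source_index i) 0)
            ++ List.replicate (pal.length - m) 0).set m (pal.getD (source_index m) 0) = _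
        have hlen : ((List.range m).map (fun i => pal.getD (source_index i) 0)).length = m := by simp
        have hrep : List.replicate (pal.length - m) (0 : Int)
            = (0 : Int) :: List.replicate (pal.length - (m + 1)) 0 := by
          have : pal.length - m = (pal.length - (m + 1)) + 1 := by omega
          rw [this, List.replicate_succ]
        rw [List.set_append_right _ _ (by omega), hlen, Nat.sub_self, hrep]
        simp [List.map_append]
      · show (List.range m).map (fun i => ((source_index i : Nat) : Int))
            ++ [((source_index m : Nat) : Int)] = _
        simp [List.map_append]

/-- B's result in the same closed form. -/
lemma altB (pal : List Int) :
    defilter_palette_alt pal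
    = ((List.range (pal.length / 32 * 32)).map (fun i => pal.getD (source_index i) 0)
         ++ List.replicate (pal.length - pal.length / 32 * 32) 0,
       (List.range (pal.length / 32 * 32)).map (fun i => ((source_index i : Nat) : Int))) := by
  simp [defilter_palette_alt, List.map_map, Function.comp]

-- ===== VERDICT (by name: the statement is the Claim_ definition above) =====
theorem defilter_palette_spec : Claim_equal_defilter_palette := by
  intro pal _
  show defilter_palette pal = defilter_palette_alt pal
  rw [altB]
  have hm : pal.length / 32 * 32 ≤ pal.length := Nat.div_mul_le_self _ _
  simp only [defilter_palette]
  simp only [stepA_eq]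
  rw [outerA, show 32 * (pal.length / 32) = pal.length / 32 * 32 from Nat.mul_comm _ _,
    foldl_body_range pal _ hm]
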